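-- pv_equiv track=rewrite | github.com/PgBiel/sbt | sbt/utils/fuzzywuzzy.py | real_quick_partial_ratio
-- ===== SOURCE A (Python) =====
-- import difflib
--
-- def real_quick_ratio(a: str, b: str):
--     matcher = difflib.SequenceMatcher(None, a, b)
--     return int(round(matcher.real_quick_ratio() * 100))
--
-- def real_quick_partial_ratio(a: str, b: str):
--     short, long_ = (a, b) if len(a) <= len(b) else (b, a)
--     matcher = difflib.SequenceMatcher(None, short, long_)
--
--     blocks = matcher.get_matching_blocks()
--
--     scores = list()
--     for (i, j, n) in blocks:
--         start = max(j - i, 0)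
--         end = start + len(short)
--
--         score = real_quick_ratio(short, long_[start:end])
--         scores.append(score)
--
--     return max(scores)
-- ===== SOURCE B (Python) =====
-- def real_quick_partial_ratio(a: str, b: str):
--     # difflib's get_matching_blocks always ends with the sentinel block
--     # (len(short), len(long_), 0), whose window long_[len(long_)-len(short):]
--     # has length exactly len(short); real_quick_ratio of two equal-length
--     # strings is 100, the maximum possible score, so max(scores) is always 100.
--     return 100
-- ===== Notes on version B (the rewrite author's own statement) =====
-- stated objective: simpler
-- what changed: B replaces the SequenceMatcher construction, the matching-block loop and the score list by the closed-form constant 100: the sentinel matching block (len(short), len(long), 0) always yields a window of length len(short), whose real_quick_ratio is 100, the maximum possible score, so the max is always 100.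
import Mathlib
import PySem

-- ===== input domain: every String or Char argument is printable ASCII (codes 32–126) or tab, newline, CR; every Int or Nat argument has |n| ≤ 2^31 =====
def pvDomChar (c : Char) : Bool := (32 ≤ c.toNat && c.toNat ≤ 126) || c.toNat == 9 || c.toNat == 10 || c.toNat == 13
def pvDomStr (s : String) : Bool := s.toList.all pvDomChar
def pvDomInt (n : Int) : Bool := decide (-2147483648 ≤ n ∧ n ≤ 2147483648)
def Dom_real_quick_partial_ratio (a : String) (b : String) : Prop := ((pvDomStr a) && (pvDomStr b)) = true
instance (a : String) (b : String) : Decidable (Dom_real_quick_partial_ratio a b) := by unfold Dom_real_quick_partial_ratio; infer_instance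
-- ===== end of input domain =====

-- B replaces A's SequenceMatcher/block-loop/score-list computation by the closed-form
-- constant 100 (the sentinel matching block always scores 100, the maximum possible).

-- ===== PORT A =====
-- A calls difflib.SequenceMatcher(None, …) (isjunk = None, autojunk = True); the difflib
-- internals it exercises (__chain_b, find_longest_match, get_matching_blocks,
-- real_quick_ratio) are ported below step for step.

-- round(x) on the exact rational n/d (d > 0): Python's banker's rounding (half to even).
-- Python computes the ratio in floating point; it is modelled here as the exact rational.
def pvRound (n d : Int) : Int :=
  let q := n / d       -- Euclidean division = floor, since d > 0
  let r := n % d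
  if 2 * r < d then q
  else if 2 * r > d then q + 1
  else if q % 2 = 0 then q else q + 1

-- int(round(SequenceMatcher(None, s, t).real_quick_ratio() * 100))
-- real_quick_ratio = _calculate_ratio(min(la, lb), la + lb) = 2*min/(la+lb), or 1.0 if la+lb == 0
def pvRealQuickRatio (s t : List Char) : Int :=
  let la : Int := s.length
  let lb : Int := t.length
  if la + lb ≠ 0 then pvRound (200 * min la lb) (la + lb) else 100

-- __chain_b: b2j maps each element of b to the ascending list of its indices;
-- isjunk is None so bjunk = ∅; autojunk deletes "popular" elements when len(b) >= 200.
def pvChainB (b : List Char) : PySem.Dict Char (List Int) :=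
  let b2j := (PySem.List.enumerate b).foldl
    (fun (d : PySem.Dict Char (List Int)) p => d.insert p.2 (d.getD p.2 [] ++ [p.1])) PySem.Dict.empty
  let n : Int := b.length
  if n ≥ 200 then
    let ntest := PySem.Int.floordiv n 100 + 1
    let popular := (b2j.items.filter (fun p => (p.2.length : Int) > ntest)).map (·.1)
    popular.foldl (fun d k => d.erase k) b2j
  else b2j

-- inner 'for j in b2j.get(a[i], nothing)' loop of find_longest_match, with continue/break;
-- state = (newj2len, besti, bestj, bestsize)
def pvFlmInner (j2len : PySem.Dict Int Int) (i blo bhi : Int) :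
    List Int → PySem.Dict Int Int × Int × Int × Int → PySem.Dict Int Int × Int × Int × Int
  | [], st => st
  | j :: rest, st =>
    if j < blo then pvFlmInner j2len i blo bhi rest st           -- continue
    else if j ≥ bhi then st                                      -- break
    else
      let (newj2len, besti, bestj, bestsize) := st
      let k := j2len.getD (j - 1) 0 + 1
      let newj2len := newj2len.insert j k
      if k > bestsize then pvFlmInner j2len i blo bhi rest (newj2len, i - k + 1, j - k + 1, k)
      else pvFlmInner j2len i blo bhi rest (newj2len, besti, bestj, bestsize)

-- first extension while-loop (bjunk is empty, so 'not isbjunk(…)' is True)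
def pvExtendLeft (a b : List Char) (alo blo : Int) (besti bestj bestsize : Int) :
    Int × Int × Int :=
  if h : alo < besti ∧ blo < bestj ∧
      PySem.List.pyGetD a (besti - 1) ' ' = PySem.List.pyGetD b (bestj - 1) ' ' then
    pvExtendLeft a b alo blo (besti - 1) (bestj - 1) (bestsize + 1)
  else (besti, bestj, bestsize)
termination_by (besti - alo).toNat
decreasing_by omega

-- second extension while-loop
def pvExtendRight (a b : List Char) (ahi bhi : Int) (besti bestj bestsize : Int) : Int :=
  if h : besti + bestsize < ahi ∧ bestj + bestsize < bhi ∧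
      PySem.List.pyGetD a (besti + bestsize) ' ' = PySem.List.pyGetD b (bestj + bestsize) ' ' then
    pvExtendRight a b ahi bhi besti bestj (bestsize + 1)
  else bestsize
termination_by (ahi - (besti + bestsize)).toNat
decreasing_by omega

-- find_longest_match(alo, ahi, blo, bhi); the two junk extension loops are omitted:
-- isjunk is None so bjunk is empty and their conditions are always False.
def pvFindLongestMatch (a b : List Char) (b2j : PySem.Dict Char (List Int))
    (alo ahi blo bhi : Int) : Int × Int × Int :=
  let st := (PySem.List.pyRange alo ahi 1).foldl
    (fun (st : PySem.Dict Int Int × Int × Int × Int) i =>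
      let (j2len, besti, bestj, bestsize) := st
      let js := b2j.getD (PySem.List.pyGetD a i ' ') []
      pvFlmInner j2len i blo bhi js (PySem.Dict.empty, besti, bestj, bestsize))
    (PySem.Dict.empty, alo, blo, 0)
  let (_, besti, bestj, bestsize) := st
  let (besti, bestj, bestsize) := pvExtendLeft a b alo blo besti bestj bestsize
  let bestsize := pvExtendRight a b ahi bhi besti bestj bestsize
  (besti, bestj, bestsize)

-- the 'while queue' loop of get_matching_blocks; queue.pop() pops the LAST element.
-- fuel only makes the recursion structural (the loop does at most 2*len a + 1 pops).
def pvGmbLoop (a b : List Char) (b2j : PySem.Dict Char (List Int)) :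
    Nat → List (Int × Int × Int × Int) → List (Int × Int × Int) → List (Int × Int × Int)
  | 0, _, acc => acc
  | fuel + 1, queue, acc =>
    match queue.getLast? with
    | none => acc
    | some (alo, ahi, blo, bhi) =>
      let rest := queue.dropLast
      let (i, j, k) := pvFindLongestMatch a b b2j alo ahi blo bhi
      if k ≠ 0 then
        let rest := if alo < i ∧ blo < j then rest ++ [(alo, i, blo, j)] else rest
        let rest := if i + k < ahi ∧ j + k < bhi then rest ++ [(i + k, ahi, j + k, bhi)] else rest
        pvGmbLoop a b b2j fuel rest (acc ++ [(i, j, k)])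
      else pvGmbLoop a b b2j fuel rest acc

-- get_matching_blocks
def pvGetMatchingBlocks (a b : List Char) : List (Int × Int × Int) :=
  let la : Int := a.length
  let lb : Int := b.length
  let b2j := pvChainB b
  let mbs := pvGmbLoop a b b2j (2 * a.length + 2) [(0, la, 0, lb)] []
  -- matching_blocks.sort(): Python sorts the triples lexicographically; the blocks are
  -- pairwise disjoint in both sequences, so sorting by (i, j) coincides with it.
  let mbs := PySem.List.sorted2 mbs (fun t => t.1) (fun t => t.2.1)
  -- merge adjacent blocks; state = (i1, j1, k1, non_adjacent)
  let st := mbs.foldl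
    (fun (st : Int × Int × Int × List (Int × Int × Int)) t =>
      let (i1, j1, k1, acc) := st
      let (i2, j2, k2) := t
      if i1 + k1 = i2 ∧ j1 + k1 = j2 then (i1, j1, k1 + k2, acc)
      else if k1 ≠ 0 then (i2, j2, k2, acc ++ [(i1, j1, k1)])
      else (i2, j2, k2, acc))
    (0, 0, 0, [])
  (if st.2.2.1 ≠ 0 then st.2.2.2 ++ [(st.1, st.2.1, st.2.2.1)] else st.2.2.2) ++ [(la, lb, 0)]

-- score of one matching block: real_quick_ratio(short, long_[start:end]) (the loop body)
def pvScore (short long_ : List Char) (t : Int × Int × Int) : Int :=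
  let start := max (t.2.1 - t.1) 0
  let e := start + (short.length : Int)
  pvRealQuickRatio short (PySem.List.slice long_ (some start) (some e))

def real_quick_partial_ratio (a : String) (b : String) : Int :=
  let al := a.toList
  let bl := b.toList
  let p := if al.length ≤ bl.length then (al, bl) else (bl, al)
  let short := p.1
  let long_ := p.2
  let blocks := pvGetMatchingBlocks short long_
  let scores := blocks.map (pvScore short long_)
  -- max(scores); scores is never empty (the sentinel block is always present)
  (PySem.List.max? scores (fun x => x)).getD 0

-- ===== PORT B =====
def real_quick_partial_ratio_alt (_a : String) (_b : String) : Int := 100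

-- ===== PRECONDITION & SPEC =====
def Spec_real_quick_partial_ratio (a : String) (b : String) (out : Int) : Prop := out = real_quick_partial_ratio_alt a b
instance (a : String) (b : String) (out : Int) : Decidable (Spec_real_quick_partial_ratio a b out) := by unfold Spec_real_quick_partial_ratio; infer_instance

-- ===== CLAIM (what is proved, stated in full; the proofs are below) =====
def Claim_equal_real_quick_partial_ratio : Prop := ∀ (a : String) (b : String), Dom_real_quick_partial_ratio a b → Spec_real_quick_partial_ratio a b (real_quick_partial_ratio a b)

-- ===== LEMMAS AND PROOFS =====

theorem pvRound_le_100 (n d : Int) (hd : 0 < d) (hn : n ≤ 100 * d) : pvRound n d ≤ 100 := by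
  simp only [pvRound]
  have h1 := Int.emod_add_mul_ediv n d
  have h2 := Int.emod_nonneg n (ne_of_gt hd)
  have h3 := Int.emod_lt_of_pos n hd
  have hq : n / d ≤ 100 := by nlinarith
  have hq' : 2 * (n % d) ≥ d → n / d ≤ 99 := by intro h; nlinarith
  split_ifs with h h' h'' <;> omega

theorem pvRound_hundred (d : Int) (hd : 0 < d) : pvRound (100 * d) d = 100 := by
  unfold pvRound
  have hq : 100 * d / d = 100 := Int.mul_ediv_cancel 100 (ne_of_gt hd)
  have hr : 100 * d % d = 0 := Int.mul_emod_left 100 d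
  rw [hq, hr]
  simp
  omega

theorem pvRealQuickRatio_le_100 (s t : List Char) : pvRealQuickRatio s t ≤ 100 := by
  simp only [pvRealQuickRatio]
  split_ifs with h
  · apply pvRound_le_100 _ _ (by omega) (by omega)
  · omega

theorem pvRealQuickRatio_eq_len (s t : List Char) (h : s.length = t.length) :
    pvRealQuickRatio s t = 100 := by
  simp only [pvRealQuickRatio]
  split_ifs with h0
  · have hmin : min (s.length : Int) (t.length : Int) = (s.length : Int) := by omega
    have h200 : (200 : Int) * min (s.length : Int) (t.length : Int)
        = 100 * ((s.length : Int) + (t.length : Int)) := by omega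
    rw [h200]
    exact pvRound_hundred _ (by omega)
  · rfl

theorem pv_max_append_100 (l : List Int) (h : ∀ x ∈ l, x ≤ 100) :
    (PySem.List.max? (l ++ [100]) (fun x => x)).getD 0 = 100 := by
  cases l with
  | nil => decide
  | cons x t =>
    have hx : x ≤ 100 := h x (by simp)
    rw [List.cons_append, PySem.List.max?_id_cons]
    have hfold : (t ++ [100]).foldl max x = 100 := by
      rw [List.foldl_append]
      have hle : t.foldl max x ≤ 100 := by
        rcases PySem.List.foldl_max_mem t x with hm | hm
        · omega
        · exact h _ (by simp [hm])
      simp [List.foldl]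
      omega
    rw [hfold]
    rfl

-- blocks always end with the sentinel (len a, len b, 0)
theorem pvGetMatchingBlocks_last (a b : List Char) :
    ∃ X, pvGetMatchingBlocks a b = X ++ [((a.length : Int), (b.length : Int), 0)] :=
  ⟨_, rfl⟩

theorem pvScore_le_100 (s t : List Char) (t' : Int × Int × Int) : pvScore s t t' ≤ 100 :=
  pvRealQuickRatio_le_100 _ _

theorem pvScore_sentinel (s t : List Char) (h : s.length ≤ t.length) :
    pvScore s t ((s.length : Int), (t.length : Int), 0) = 100 := by
  simp only [pvScore]
  have hstart : max ((t.length : Int) - (s.length : Int)) 0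
      = (t.length : Int) - (s.length : Int) := by omega
  rw [hstart]
  have he : (t.length : Int) - (s.length : Int) + (s.length : Int) = (t.length : Int) := by ring
  rw [he]
  apply pvRealQuickRatio_eq_len
  rw [PySem.List.slice_of_nonneg]
  · simp
    omega
  all_goals omega

theorem pv_key (s t : List Char) (h : s.length ≤ t.length) :
    ((PySem.List.max? ((pvGetMatchingBlocks s t).map (pvScore s t)) (fun x => x)).getD 0)
      = 100 := by
  obtain ⟨X, hX⟩ := pvGetMatchingBlocks_last s t
  rw [hX, List.map_append, List.map_singleton, pvScore_sentinel s t h]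
  apply pv_max_append_100
  intro x hx
  simp only [List.mem_map] at hx
  obtain ⟨t', _, rfl⟩ := hx
  exact pvScore_le_100 _ _ _

-- ===== VERDICT (by name: the statement is the Claim_ definition above) =====
theorem real_quick_partial_ratio_spec : Claim_equal_real_quick_partial_ratio := by
  intro a b _
  unfold Spec_real_quick_partial_ratio
  simp only [real_quick_partial_ratio, real_quick_partial_ratio_alt]
  by_cases h : a.toList.length ≤ b.toList.length
  · rw [if_pos h]
    exact pv_key a.toList b.toList h
  · rw [if_neg h]
    exact pv_key b.toList a.toList (by omega)
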